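-- pv_equiv track=rewrite | github.com/2gfhixs/OGREE | ogree_alpha/adapters/sec_edgar.py | _normalize_ticker_symbol
-- ===== SOURCE A (Python) =====
-- from typing import Any, Dict, Iterable, Mapping, MutableMapping, Tuple
--
-- def _clean_str(value: Any) -> str | None:
--     if value is None:
--         return None
--     if not isinstance(value, str):
--         value = str(value)
--     value = " ".join(value.strip().split())
--     return value if value else None
--
-- def _normalize_ticker_symbol(value: Any) -> str | None:
--     s = _clean_str(value)
--     if not s:
--         return None
--     s = s.upper()
--     if ":" in s:
--         s = s.split(":", 1)[1]
--     if "." in s: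
--         s = s.split(".", 1)[0]
--     if "-" in s:
--         s = s.split("-", 1)[0]
--     s = "".join(ch for ch in s if ch.isalnum())
--     return s or None
-- ===== SOURCE B (Python) =====
-- def _normalize_ticker_symbol(value):
--     # One fused pass instead of clean/split/split/split/filter: cut after the
--     # first ':' and then scan once, breaking on '.'/'-' and keeping alnum chars.
--     if value is None:
--         return None
--     if not isinstance(value, str):
--         value = str(value)
--     s = value.upper()
--     i = s.find(":")
--     if i >= 0:
--         s = s[i + 1:]
--     out = []
--     for ch in s:
--         if ch == "." or ch == "-":
--             break
--         if ch.isalnum():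
--             out.append(ch)
--     return "".join(out) or None
-- ===== Notes on version B (the rewrite author's own statement) =====
-- stated objective: simpler
-- what changed: Replaces A's clean/strip/split-join whitespace pass and the three sequential split(':'),split('.'),split('-') passes plus a final alnum comprehension by a single colon cut followed by one fused left-to-right scan that breaks at the first '.' or '-' and keeps only alphanumeric characters.
import Mathlib
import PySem

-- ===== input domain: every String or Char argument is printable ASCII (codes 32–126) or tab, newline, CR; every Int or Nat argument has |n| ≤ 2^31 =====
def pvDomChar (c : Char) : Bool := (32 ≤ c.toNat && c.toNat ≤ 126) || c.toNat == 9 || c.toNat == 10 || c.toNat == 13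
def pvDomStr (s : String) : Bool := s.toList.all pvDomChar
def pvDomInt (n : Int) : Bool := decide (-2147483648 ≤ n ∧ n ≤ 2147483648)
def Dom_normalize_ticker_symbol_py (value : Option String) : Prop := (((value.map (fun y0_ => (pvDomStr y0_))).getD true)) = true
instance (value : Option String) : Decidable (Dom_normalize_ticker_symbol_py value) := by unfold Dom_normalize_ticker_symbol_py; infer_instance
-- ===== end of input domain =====

-- B replaces A's clean/split(":")/split(".")/split("-")/filter pipeline by a colon cut plus ONE
-- fused scan that breaks on '.'/'-' and keeps alnum chars (objective: simpler, same cost).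

-- ===== PORT A =====
-- _clean_str's string work: " ".join(value.strip().split()); its None-for-empty
-- together with the caller's `if not s: return None` is the single isEmpty check below.
def pvCleanChars (cs : List Char) : List Char :=
  PySem.Chars.join [' '] (PySem.Chars.split₀ (PySem.Chars.strip cs))

def normalize_ticker_symbol_py (value : Option String) : Option String :=
  match value with
  | none => none            -- _clean_str(None) = None, then `if not s: return None`
  | some v =>
    let s0 := pvCleanChars v.toList
    if s0.isEmpty then none -- `if not s: return None` (covers _clean_str's empty→None too)
    else
      let s1 := PySem.Chars.upper s0
      -- s.split(sep, 1) with sep ≠ "" is splitOnMax; `[1]` is in range because ':' ∈ s (ported as getD)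
      let s2 := if PySem.Chars.isIn [':'] s1 then (PySem.Chars.splitOnMax s1 [':'] 1).getD 1 [] else s1
      let s3 := if PySem.Chars.isIn ['.'] s2 then (PySem.Chars.splitOnMax s2 ['.'] 1).getD 0 [] else s2
      let s4 := if PySem.Chars.isIn ['-'] s3 then (PySem.Chars.splitOnMax s3 ['-'] 1).getD 0 [] else s3
      let s5 := s4.filter PySem.Chars.isalnum
      if s5.isEmpty then none else some (String.ofList s5)

-- ===== PORT B =====
-- the fused loop of Source B: break on '.'/'-', keep alnum
def pvScan : List Char → List Char
  | [] => []
  | c :: rest =>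
    if c = '.' || c = '-' then []
    else if PySem.Chars.isalnum c then c :: pvScan rest else pvScan rest

def normalize_ticker_symbol_py_alt (value : Option String) : Option String :=
  match value with
  | none => none
  | some v =>
    let s := PySem.Chars.upper v.toList
    let i := PySem.Chars.find s [':']
    let s' := if 0 ≤ i then s.drop (i.toNat + 1) else s   -- s = s[i+1:]
    let out := pvScan s'
    if out.isEmpty then none else some (String.ofList out)

-- ===== PRECONDITION & SPEC =====
def Spec_normalize_ticker_symbol_py (value : Option String) (out : Option String) : Prop := out = normalize_ticker_symbol_py_alt value
instance (value : Option String) (out : Option String) : Decidable (Spec_normalize_ticker_symbol_py value out) := by unfold Spec_normalize_ticker_symbol_py; infer_instance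

-- ===== CLAIM (what is proved, stated in full; the proofs are below) =====
def Claim_equal_normalize_ticker_symbol_py : Prop := ∀ (value : Option String), Dom_normalize_ticker_symbol_py value → Spec_normalize_ticker_symbol_py value (normalize_ticker_symbol_py value)

-- ===== LEMMAS AND PROOFS =====

-- proof-side abstractions
def pvNonws (cs : List Char) : List Char := cs.filter (fun c => !PySem.Chars.isspace c)

def pvCut (ch : Char) : List Char → Option (List Char)
  | [] => none
  | c :: r => if c = ch then some r else pvCut ch r

def pvCore (cs : List Char) : List Char := pvScan ((pvCut ':' cs).getD cs)

-- find.go characterised by pvCut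
theorem pv_findgo_spec (ch : Char) : ∀ (cs : List Char) (k : Nat),
    (PySem.Chars.find.go [ch] cs k = -1 ∧ pvCut ch cs = none) ∨
    (∃ j : Nat, PySem.Chars.find.go [ch] cs k = ((k + j : Nat) : Int) ∧ pvCut ch cs = some (cs.drop (j + 1))) := by
  intro cs
  induction cs with
  | nil => intro k; left; simp [PySem.Chars.find.go, pvCut]
  | cons c rest ih =>
    intro k
    by_cases h : c = ch
    · right; exact ⟨0, by simp [PySem.Chars.find.go, List.isPrefixOf, h], by simp [pvCut, h]⟩
    · have hpre : [ch].isPrefixOf (c :: rest) = false := by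
        simp [List.isPrefixOf]; exact fun hc => absurd hc.symm h
      rcases ih (k + 1) with ⟨h1, h2⟩ | ⟨j, h1, h2⟩
      · left; constructor
        · simpa [PySem.Chars.find.go, hpre] using h1
        · simp [pvCut, h, h2]
      · right
        refine ⟨j + 1, ?_, ?_⟩
        · have : PySem.Chars.find.go [ch] (c :: rest) k = PySem.Chars.find.go [ch] rest (k + 1) := by
            simp [PySem.Chars.find.go, hpre]
          rw [this, h1]; push_cast; ring
        · simp [pvCut, h, h2]

theorem pv_find_spec (ch : Char) (cs : List Char) :
    (PySem.Chars.find cs [ch] = -1 ∧ pvCut ch cs = none) ∨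
    (∃ j : Nat, PySem.Chars.find cs [ch] = (j : Int) ∧ pvCut ch cs = some (cs.drop (j + 1))) := by
  have := pv_findgo_spec ch cs 0
  simpa [PySem.Chars.find] using this

theorem pv_isIn_eq (ch : Char) (cs : List Char) :
    PySem.Chars.isIn [ch] cs = (pvCut ch cs).isSome := by
  rcases pv_find_spec ch cs with ⟨h1, h2⟩ | ⟨j, h1, h2⟩
  · simp [PySem.Chars.isIn, h1, h2]
  · simp [PySem.Chars.isIn, h1, h2]

-- B's colon step is pvCut
theorem pv_alt_cut (cs : List Char) :
    (if 0 ≤ PySem.Chars.find cs [':'] then cs.drop ((PySem.Chars.find cs [':']).toNat + 1) else cs)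
      = (pvCut ':' cs).getD cs := by
  rcases pv_find_spec ':' cs with ⟨h1, h2⟩ | ⟨j, h1, h2⟩
  · simp [h1, h2]
  · simp [h1, h2]

-- splitOnMax.go characterised
theorem pv_go_zero (ch : Char) (fuel : Nat) (rest : List Char) (acc : List (List Char)) :
    PySem.Chars.splitOnMax.go [ch] fuel 0 rest [] acc = (rest :: acc).reverse := by
  cases fuel with
  | zero => simp [PySem.Chars.splitOnMax.go]
  | succ f => cases rest with
    | nil => simp [PySem.Chars.splitOnMax.go]
    | cons c r => simp [PySem.Chars.splitOnMax.go]

theorem pv_go_one (ch : Char) : ∀ (cs : List Char) (fuel : Nat) (cur : List Char), cs.length < fuel →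
    PySem.Chars.splitOnMax.go [ch] fuel 1 cs cur [] =
      (match pvCut ch cs with
       | none => [cur.reverse ++ cs]
       | some r => [cur.reverse ++ cs.takeWhile (· ≠ ch), r]) := by
  intro cs
  induction cs with
  | nil =>
    intro fuel cur h
    cases fuel with
    | zero => omega
    | succ f => simp [PySem.Chars.splitOnMax.go, pvCut]
  | cons c rest ih =>
    intro fuel cur h
    cases fuel with
    | zero => omega
    | succ f =>
      by_cases hc : c = ch
      · have hpre : [ch].isPrefixOf (c :: rest) = true := by simp [List.isPrefixOf, hc]
        simp only [PySem.Chars.splitOnMax.go, hpre]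
        simp [pv_go_zero, pvCut, hc]
      · have hpre : [ch].isPrefixOf (c :: rest) = false := by
          simp [List.isPrefixOf]; exact fun hc' => absurd hc'.symm hc
        have hlen : rest.length < f := by simpa using h
        simp only [PySem.Chars.splitOnMax.go, hpre]
        rw [ih f (c :: cur) hlen]
        cases hcut : pvCut ch rest with
        | none => simp [pvCut, hc, hcut]
        | some r => simp [pvCut, hc, hcut, List.takeWhile_cons_of_neg, hc]

theorem pv_splitOnMax_one (ch : Char) (cs : List Char) :
    PySem.Chars.splitOnMax cs [ch] 1 =
      (match pvCut ch cs with
       | none => [cs]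
       | some r => [cs.takeWhile (· ≠ ch), r]) := by
  have h := pv_go_one ch cs (cs.length + 1) [] (by omega)
  simpa [PySem.Chars.splitOnMax] using h

-- A's three split steps
theorem pv_colonA (cs : List Char) :
    (if PySem.Chars.isIn [':'] cs then (PySem.Chars.splitOnMax cs [':'] 1).getD 1 [] else cs)
      = (pvCut ':' cs).getD cs := by
  rw [pv_isIn_eq, pv_splitOnMax_one]
  cases h : pvCut ':' cs with
  | none => simp
  | some r => simp

theorem pv_cut_none_takeWhile (ch : Char) : ∀ (cs : List Char), pvCut ch cs = none →
    cs.takeWhile (· ≠ ch) = cs := by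
  intro cs
  induction cs with
  | nil => intro _; simp
  | cons c r ih =>
    intro h
    by_cases hc : c = ch
    · simp [pvCut, hc] at h
    · simp only [pvCut, if_neg hc] at h
      rw [List.takeWhile_cons_of_pos (by simp [hc]), ih h]

theorem pv_dotA (ch : Char) (cs : List Char) :
    (if PySem.Chars.isIn [ch] cs then (PySem.Chars.splitOnMax cs [ch] 1).getD 0 [] else cs)
      = cs.takeWhile (· ≠ ch) := by
  rw [pv_isIn_eq, pv_splitOnMax_one]
  cases h : pvCut ch cs with
  | none => simpa [ne_eq] using (pv_cut_none_takeWhile ch cs h).symm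
  | some r => simp

-- the take-before-'.'-then-before-'-'-then-filter pipeline is pvScan
theorem pv_pipeline_scan : ∀ (cs : List Char),
    ((cs.takeWhile (· ≠ '.')).takeWhile (· ≠ '-')).filter PySem.Chars.isalnum = pvScan cs := by
  intro cs
  induction cs with
  | nil => simp [pvScan]
  | cons c r ih =>
    by_cases hd : c = '.'
    · simp [List.takeWhile_cons, hd, pvScan]
    · by_cases hm : c = '-'
      · simp [List.takeWhile_cons, hd, hm, pvScan]
      · by_cases ha : PySem.Chars.isalnum c
        · simp only [ne_eq, decide_not] at ih ⊢
          simp [List.takeWhile_cons, hd, hm, pvScan, ha, List.filter_cons, ih]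
        · simp only [ne_eq, decide_not] at ih ⊢
          simp [List.takeWhile_cons, hd, hm, pvScan, ha, List.filter_cons, ih]

-- whitespace facts
theorem pv_le_toNat (a b : Char) : (a ≤ b) ↔ a.toNat ≤ b.toNat := by
  rw [Char.le_def, UInt32.le_iff_toNat_le]; rfl

theorem pv_ws_not_alnum (c : Char) (h : PySem.Chars.isspace c = true) :
    PySem.Chars.isalnum c = false := by
  simp only [PySem.Chars.isspace, Bool.or_eq_true, Bool.and_eq_true, decide_eq_true_eq] at h
  simp only [PySem.Chars.isalnum, PySem.Chars.isalpha, PySem.Chars.isdigit,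
    PySem.Chars.isupper, PySem.Chars.islower, Bool.or_eq_false_iff, Bool.and_eq_false_iff,
    decide_eq_false_iff_not, pv_le_toNat, not_le]
  have c1 : ('A').toNat = 65 := rfl
  have c2 : ('Z').toNat = 90 := rfl
  have c3 : ('a').toNat = 97 := rfl
  have c4 : ('z').toNat = 122 := rfl
  have c5 : ('0').toNat = 48 := rfl
  have c6 : ('9').toNat = 57 := rfl
  omega

theorem pv_ws_ne (c x : Char) (h : PySem.Chars.isspace c = true) (hx : PySem.Chars.isspace x = false) :
    c ≠ x := by
  intro he; rw [he] at h; rw [h] at hx; exact absurd hx (by simp)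

theorem pv_scan_nonws : ∀ (cs : List Char), pvScan (pvNonws cs) = pvScan cs := by
  intro cs
  induction cs with
  | nil => simp [pvNonws]
  | cons c r ih =>
    have ih' : pvScan (List.filter (fun c => !PySem.Chars.isspace c) r) = pvScan r := ih
    cases hw : PySem.Chars.isspace c with
    | true =>
      have h1 : c ≠ '.' := pv_ws_ne c '.' hw (by decide)
      have h2 : c ≠ '-' := pv_ws_ne c '-' hw (by decide)
      have h3 := pv_ws_not_alnum c hw
      simp only [pvNonws, List.filter_cons, hw, Bool.not_true, Bool.false_eq_true, if_false]
      rw [ih']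
      simp [pvScan, h1, h2, h3]
    | false =>
      simp only [pvNonws, List.filter_cons, hw, Bool.not_false, if_true]
      simp only [pvScan, ih']

theorem pv_cut_nonws (cs : List Char) :
    pvCut ':' (pvNonws cs) = (pvCut ':' cs).map pvNonws := by
  induction cs with
  | nil => simp [pvNonws, pvCut]
  | cons c r ih =>
    have ih' : pvCut ':' (List.filter (fun c => !PySem.Chars.isspace c) r)
        = (pvCut ':' r).map pvNonws := ih
    cases hw : PySem.Chars.isspace c with
    | true =>
      have h1 : c ≠ ':' := pv_ws_ne c ':' hw (by decide)
      simp only [pvNonws, List.filter_cons, hw, Bool.not_true, Bool.false_eq_true, if_false]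
      simp only [pvCut, if_neg h1]
      exact ih'
    | false =>
      by_cases hc : c = ':'
      · simp only [pvNonws, List.filter_cons, hw, Bool.not_false, if_true]
        simp [pvCut, hc, pvNonws]
      · simp only [pvNonws, List.filter_cons, hw, Bool.not_false, if_true]
        simp only [pvCut, if_neg hc]
        exact ih'

theorem pv_core_nonws (cs : List Char) : pvCore (pvNonws cs) = pvCore cs := by
  unfold pvCore
  rw [pv_cut_nonws]
  cases h : pvCut ':' cs with
  | none => simp [pv_scan_nonws]
  | some r => simp [pv_scan_nonws]

theorem pv_ws_upper (c : Char) :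
    PySem.Chars.isspace (PySem.Chars.upperChar c) = PySem.Chars.isspace c := by
  simp only [PySem.Chars.upperChar, PySem.Chars.islower]
  split
  · rename_i h
    simp only [Bool.and_eq_true, decide_eq_true_eq, pv_le_toNat] at h
    have c3 : ('a').toNat = 97 := rfl
    have c4 : ('z').toNat = 122 := rfl
    have h1 : 97 ≤ c.toNat := by omega
    have h2 : c.toNat ≤ 122 := by omega
    have hv : (Char.ofNat (c.toNat - 32)).toNat = c.toNat - 32 := by
      rw [Char.toNat_ofNat]
      have : (c.toNat - 32).isValidChar := Or.inl (by omega)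
      simp [this]
    have hL : PySem.Chars.isspace (Char.ofNat (c.toNat - 32)) = false := by
      simp only [PySem.Chars.isspace, hv, Bool.or_eq_false_iff, Bool.and_eq_false_iff,
        decide_eq_false_iff_not, not_le]
      omega
    have hR : PySem.Chars.isspace c = false := by
      simp only [PySem.Chars.isspace, Bool.or_eq_false_iff, Bool.and_eq_false_iff,
        decide_eq_false_iff_not, not_le]
      omega
    rw [hL, hR]
  · rfl

theorem pv_nonws_upper (cs : List Char) :
    pvNonws (PySem.Chars.upper cs) = PySem.Chars.upper (pvNonws cs) := by
  simp only [pvNonws, PySem.Chars.upper, List.filter_map]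
  congr 1
  apply List.filter_congr
  intro x _
  simp [Function.comp, pv_ws_upper]

-- cleaning preserves the non-whitespace characters
theorem pv_split₀_go_flatten : ∀ (l cur : List Char) (acc : List (List Char)),
    (PySem.Chars.split₀.go l cur acc).flatten = acc.reverse.flatten ++ cur.reverse ++ pvNonws l := by
  intro l
  induction l with
  | nil =>
    intro cur acc
    by_cases h : cur.isEmpty
    · simp [PySem.Chars.split₀.go, h, List.isEmpty_iff.mp h, pvNonws]
    · simp [PySem.Chars.split₀.go, h, pvNonws]
  | cons c rest ih =>
    intro cur acc
    cases hw : PySem.Chars.isspace c with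
    | true =>
      by_cases h : cur.isEmpty
      · simp only [PySem.Chars.split₀.go, hw, h, if_true]
        rw [ih]
        simp [List.isEmpty_iff.mp h, pvNonws, List.filter_cons, hw]
      · simp only [PySem.Chars.split₀.go, hw, h, if_true, Bool.false_eq_true, if_false]
        rw [ih]
        simp [pvNonws, List.filter_cons, hw]
    | false =>
      simp only [PySem.Chars.split₀.go, hw, Bool.false_eq_true, if_false]
      rw [ih]
      simp [pvNonws, List.filter_cons, hw]

theorem pv_split₀_flatten (cs : List Char) :
    (PySem.Chars.split₀ cs).flatten = pvNonws cs := by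
  simpa [PySem.Chars.split₀] using pv_split₀_go_flatten cs [] []

theorem pv_nonws_join (parts : List (List Char)) :
    pvNonws (PySem.Chars.join [' '] parts) = pvNonws parts.flatten := by
  induction parts with
  | nil => simp [PySem.Chars.join_nil, pvNonws]
  | cons p ps ih =>
    cases ps with
    | nil => simp [PySem.Chars.join_singleton, pvNonws]
    | cons q qs =>
      rw [PySem.Chars.join_cons_cons]
      have hsp : pvNonws [' '] = [] := by decide
      simp only [pvNonws, List.filter_append, List.flatten_cons] at ih hsp ⊢
      rw [hsp, ih]
      simp

theorem pv_nonws_idem (cs : List Char) : pvNonws (pvNonws cs) = pvNonws cs := by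
  simp [pvNonws, List.filter_filter]

theorem pv_nonws_dropWhile (cs : List Char) :
    pvNonws (cs.dropWhile PySem.Chars.isspace) = pvNonws cs := by
  induction cs with
  | nil => simp
  | cons c r ih =>
    cases hw : PySem.Chars.isspace c with
    | true =>
      rw [List.dropWhile_cons_of_pos (by simp [hw])]
      rw [ih]
      simp [pvNonws, List.filter_cons, hw]
    | false => simp [List.dropWhile_cons, hw]

theorem pv_nonws_strip (cs : List Char) :
    pvNonws (PySem.Chars.strip cs) = pvNonws cs := by
  simp only [PySem.Chars.strip, PySem.Chars.lstrip, PySem.Chars.rstrip]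
  have h1 : ∀ xs : List Char, pvNonws xs.reverse = (pvNonws xs).reverse := by
    intro xs; simp [pvNonws, List.filter_reverse]
  rw [h1, pv_nonws_dropWhile, h1, List.reverse_reverse, pv_nonws_dropWhile]

theorem pv_nonws_clean (cs : List Char) :
    pvNonws (pvCleanChars cs) = pvNonws cs := by
  unfold pvCleanChars
  rw [pv_nonws_join, pv_split₀_flatten, pv_nonws_idem, pv_nonws_strip]

-- ===== VERDICT (by name: the statement is the Claim_ definition above) =====
theorem pv_A_tail (u : List Char) :
    (if PySem.Chars.isIn ['-']
          (if PySem.Chars.isIn ['.'] (if PySem.Chars.isIn [':'] u then (PySem.Chars.splitOnMax u [':'] 1).getD 1 [] else u)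
            then (PySem.Chars.splitOnMax (if PySem.Chars.isIn [':'] u then (PySem.Chars.splitOnMax u [':'] 1).getD 1 [] else u) ['.'] 1).getD 0 []
            else (if PySem.Chars.isIn [':'] u then (PySem.Chars.splitOnMax u [':'] 1).getD 1 [] else u))
      then (PySem.Chars.splitOnMax
              (if PySem.Chars.isIn ['.'] (if PySem.Chars.isIn [':'] u then (PySem.Chars.splitOnMax u [':'] 1).getD 1 [] else u)
                then (PySem.Chars.splitOnMax (if PySem.Chars.isIn [':'] u then (PySem.Chars.splitOnMax u [':'] 1).getD 1 [] else u) ['.'] 1).getD 0 []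
                else (if PySem.Chars.isIn [':'] u then (PySem.Chars.splitOnMax u [':'] 1).getD 1 [] else u)) ['-'] 1).getD 0 []
      else (if PySem.Chars.isIn ['.'] (if PySem.Chars.isIn [':'] u then (PySem.Chars.splitOnMax u [':'] 1).getD 1 [] else u)
              then (PySem.Chars.splitOnMax (if PySem.Chars.isIn [':'] u then (PySem.Chars.splitOnMax u [':'] 1).getD 1 [] else u) ['.'] 1).getD 0 []
              else (if PySem.Chars.isIn [':'] u then (PySem.Chars.splitOnMax u [':'] 1).getD 1 [] else u))).filter PySem.Chars.isalnum
    = pvCore u := by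
  rw [pv_colonA, pv_dotA, pv_dotA, pv_pipeline_scan]
  rfl

theorem pv_core_upper_clean (cs : List Char) :
    pvCore (PySem.Chars.upper (pvCleanChars cs)) = pvCore (PySem.Chars.upper cs) := by
  rw [← pv_core_nonws (PySem.Chars.upper (pvCleanChars cs)), pv_nonws_upper, pv_nonws_clean,
      ← pv_nonws_upper, pv_core_nonws]

theorem normalize_ticker_symbol_py_spec : Claim_equal_normalize_ticker_symbol_py := by
  unfold Claim_equal_normalize_ticker_symbol_py
  intro value _
  unfold Spec_normalize_ticker_symbol_py
  cases value with
  | none => rfl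
  | some v =>
    simp only [normalize_ticker_symbol_py, normalize_ticker_symbol_py_alt]
    rw [pv_alt_cut, pv_A_tail]
    have hkey := pv_core_upper_clean v.toList
    by_cases h0 : (pvCleanChars v.toList).isEmpty
    · have hnw : pvNonws v.toList = [] := by
        rw [← pv_nonws_clean, List.isEmpty_iff.mp h0]; rfl
      have hB : pvCore (PySem.Chars.upper v.toList) = [] := by
        rw [← hkey, ← pv_core_nonws, pv_nonws_upper, pv_nonws_clean, hnw]
        rfl
      rw [if_pos h0]
      rw [show pvScan ((pvCut ':' (PySem.Chars.upper v.toList)).getD (PySem.Chars.upper v.toList))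
            = pvCore (PySem.Chars.upper v.toList) from rfl, hB]
      simp
    · rw [if_neg h0]
      show (if (pvCore (PySem.Chars.upper (pvCleanChars v.toList))).isEmpty then none
            else some (String.ofList (pvCore (PySem.Chars.upper (pvCleanChars v.toList)))))
          = (if (pvCore (PySem.Chars.upper v.toList)).isEmpty then none
            else some (String.ofList (pvCore (PySem.Chars.upper v.toList))))
      rw [hkey]
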